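-- pv_equiv track=rewrite | github.com/hoonseojung/cote | programmers/rough_keyboard.py | solution
-- ===== SOURCE A (Python) =====
-- def solution(keymap, targets):
--     answer = []
--     total = ''
--     for keys in keymap:
--         total += keys # 키패드 전체 종합
--     keypads = dict.fromkeys(total) # 중복 제거하여 dict
--     for key in keypads:
--         min_k = 100 # 최대 index = 99
--         for keys in keymap:
--             if key in keys: # 해당 키에 존재한다면
--                 temp = keys.index(key)
--                 if min_k > temp: # 현재 인덱스보다 작다면
--                     min_k = temp # 갱신
--         keypads[key] = min_k + 1 # 인덱스이므로 누른 횟수 = index + 1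
--
-- ###################################
-- # 위의 문자열을 total로 받아 dict로 만드는 과정을 훨씬 간결하게 할 수 있는 코드
--
--     keypads = {} # dict 생성
--     for k in keymap: # keymap에 있는 키에서
--         for i, char in enumerate(k): # 각 키의 문자 별
--             keypads[char] = min((i + 1), keypads[char]) if char in keypads else (i + 1)
--             # 만약 keypads에 해당 문자가 아직 존재하지 않았다면 인덱스인 i + 1을 할당,
--             # 이미 존재한다면 해당 값과 현재 인덱스인 i + 1 중 더 작은 값을 할당
-- ###################################
--
--     for target in targets:
--         press = 0 # 누른 횟수
--         for char in target: # target의 문자 별로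
--             if char in keypads: # 만약 keypad에 해당 문자가 있다면
--                 press += keypads[char] # 해당 횟수 누르기
--             else: # 못 만든다면
--                 press = -1
--                 break
--         answer.append(press)
--
--     return answer
-- ===== SOURCE B (Python) =====
-- def solution(keymap, targets):
--     # No precomputed char->cost dictionary: scan the keymaps directly per character.
--     def char_cost(ch):
--         best = None
--         for keys in keymap:
--             if ch in keys:
--                 i = keys.index(ch)
--                 if best is None or i + 1 < best:
--                     best = i + 1
--         return best
--
--     def target_presses(t):
--         press = 0
--         for ch in t:
--             c = char_cost(ch)
--             if c is None:
--                 return -1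
--             press += c
--         return press
--
--     return [target_presses(t) for t in targets]
-- ===== Notes on version B (the rewrite author's own statement) =====
-- stated objective: simpler
-- what changed: Drops A's dictionary construction (including its dead first dict-building pass) entirely: B recomputes each character's minimal press count by scanning the keymaps on demand and maps a per-target helper over targets, trading speed for a shorter, table-free decomposition.
import Mathlib
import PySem

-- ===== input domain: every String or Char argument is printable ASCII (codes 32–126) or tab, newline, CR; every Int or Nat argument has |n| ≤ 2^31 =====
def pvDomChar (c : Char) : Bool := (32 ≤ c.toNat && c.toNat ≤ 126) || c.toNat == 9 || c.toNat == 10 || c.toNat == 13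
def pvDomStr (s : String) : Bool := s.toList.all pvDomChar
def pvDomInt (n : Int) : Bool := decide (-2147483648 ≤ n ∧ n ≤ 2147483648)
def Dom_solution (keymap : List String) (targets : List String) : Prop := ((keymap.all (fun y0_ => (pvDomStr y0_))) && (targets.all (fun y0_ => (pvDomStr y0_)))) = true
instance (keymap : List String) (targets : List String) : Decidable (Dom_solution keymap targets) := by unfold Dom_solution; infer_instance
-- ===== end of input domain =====

-- B drops A's char->cost dictionary (and A's dead first dict pass): it scans the keymaps on
-- demand per target character; same return value, simpler decomposition (objective: simpler).

-- ===== PORT A =====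
-- A's per-target loop 'for char in target: …' with its break
def solutionPress (keypads : PySem.Dict Char Int) : List Char → Int → Int
  | [], press => press
  | char :: rest, press =>
    if keypads.contains char then
      solutionPress keypads rest (press + keypads.getD char 0)
    else (-1)

def solution (keymap : List String) (targets : List String) : List Int :=
  let total : String := keymap.foldl (fun total keys => total ++ keys) ""
  -- dict.fromkeys(total)
  let keypads0 : PySem.Dict Char (Option Int) :=
    total.toList.foldl (fun d c => d.insert c none) PySem.Dict.empty
  -- A's first keypads computation (overwritten below, exactly as in A)
  let _keypads_dead : PySem.Dict Char (Option Int) :=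
    keypads0.keys.foldl (fun d key =>
      let min_k : Int := keymap.foldl (fun min_k keys =>
        if keys.toList.contains key then           -- 'key in keys': single-char 'in' = membership (exact)
          let temp : Int := ((keys.toList.idxOf key : Nat) : Int)  -- keys.index(key), guarded so present
          if min_k > temp then temp else min_k
        else min_k) 100
      d.insert key (some (min_k + 1))) keypads0
  -- A's second (effective) keypads computation
  let keypads : PySem.Dict Char Int :=
    keymap.foldl (fun d k =>
      (PySem.List.enumerate k.toList 0).foldl (fun d p =>
        d.insert p.2 (if d.contains p.2 then min (p.1 + 1) (d.getD p.2 0) else p.1 + 1)) d)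
      PySem.Dict.empty
  targets.foldl (fun answer target => answer ++ [solutionPress keypads target.toList 0]) []

-- ===== PORT B =====
-- Source B's char_cost: scan all keymaps, keep the least index+1 containing ch
def solutionAltCost (keymap : List String) (ch : Char) : Option Int :=
  keymap.foldl (fun best keys =>
    if keys.toList.contains ch then                -- 'ch in keys': single-char 'in' = membership (exact)
      let i : Int := ((keys.toList.idxOf ch : Nat) : Int)  -- keys.index(ch), guarded so present
      if best.isNone || decide (i + 1 < best.getD 0) then some (i + 1) else best
    else best) none

-- Source B's target_presses
def solutionAltPress (keymap : List String) : List Char → Int → Int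
  | [], press => press
  | ch :: rest, press =>
    match solutionAltCost keymap ch with
    | none => -1
    | some c => solutionAltPress keymap rest (press + c)

def solution_alt (keymap : List String) (targets : List String) : List Int :=
  targets.map (fun t => solutionAltPress keymap t.toList 0)

-- ===== PRECONDITION & SPEC =====
def Spec_solution (keymap : List String) (targets : List String) (out : List Int) : Prop := out = solution_alt keymap targets
instance (keymap : List String) (targets : List String) (out : List Int) : Decidable (Spec_solution keymap targets out) := by unfold Spec_solution; infer_instance

-- ===== CLAIM (what is proved, stated in full; the proofs are below) =====
def Claim_equal_solution : Prop := ∀ (keymap : List String) (targets : List String), Dom_solution keymap targets → Spec_solution keymap targets (solution keymap targets)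

-- ===== LEMMAS AND PROOFS =====

-- merge a candidate press count v into an optional current best
def pvFmin (o : Option Int) (v : Int) : Int :=
  match o with
  | none => v
  | some w => min v w

-- A's inner enumerate-fold, read through get?
theorem inner_get? (l : List Char) (n : Int) (d : PySem.Dict Char Int) (c : Char) :
    ((PySem.List.enumerate l n).foldl (fun d p =>
        d.insert p.2 (if d.contains p.2 then min (p.1 + 1) (d.getD p.2 0) else p.1 + 1)) d).get? c
      = if c ∈ l then some (pvFmin (d.get? c) (n + (l.idxOf c : Nat) + 1)) else d.get? c := by
  induction l generalizing n d with
  | nil => simp [PySem.List.enumerate_nil]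
  | cons ch0 rest ih =>
    rw [PySem.List.enumerate_cons]
    simp only [List.foldl_cons]
    rw [ih]
    have hval : (d.insert ch0 (if d.contains ch0 then min (n + 1) (d.getD ch0 0) else n + 1)).get? c
        = if c = ch0 then some (pvFmin (d.get? c) (n + 1)) else d.get? c := by
      rw [PySem.Dict.get?_insert]
      by_cases hc : c = ch0
      · subst hc
        simp only [if_true]
        congr 1
        cases hg : d.get? c with
        | none =>
          have hcon : d.contains c = false := by rw [PySem.Dict.contains_eq_isSome_get?, hg]; rfl
          simp [hcon, pvFmin]
        | some w =>
          have hcon : d.contains c = true := by rw [PySem.Dict.contains_eq_isSome_get?, hg]; rfl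
          have hD : d.getD c 0 = w := by rw [PySem.Dict.getD_eq_get?_getD, hg]; rfl
          simp [hcon, hD, pvFmin]
      · simp [hc]
    rw [hval]
    by_cases hc : c = ch0
    · subst hc
      have hidx : (c :: rest).idxOf c = 0 := by simp [List.idxOf_cons_self]
      by_cases hr : c ∈ rest
      · simp only [hr, if_pos, List.mem_cons, true_or, hidx]
        cases hg : d.get? c with
        | none => simp [pvFmin]; omega
        | some w => simp [pvFmin]; omega
      · simp [hr, hidx]
    · have hmem : (c ∈ ch0 :: rest) ↔ (c ∈ rest) := by
        simp [List.mem_cons, hc]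
      by_cases hr : c ∈ rest
      · have hidx : (ch0 :: rest).idxOf c = rest.idxOf c + 1 := by
          rw [List.idxOf_cons_ne _ (by exact fun h => hc h.symm)]
        have harith : n + 1 + ((rest.idxOf c : Nat) : Int) + 1 = n + ((rest.idxOf c + 1 : Nat) : Int) + 1 := by
          push_cast; ring
        simp only [hr, if_pos, hmem.mpr hr, hidx, if_neg hc, harith]
      · simp [hr, hmem, hc]

-- B's per-keymap step equals the pvFmin update
theorem stepB_eq (keys : String) (c : Char) (o : Option Int) :
    (if keys.toList.contains c then
        (if o.isNone || decide (((keys.toList.idxOf c : Nat) : Int) + 1 < o.getD 0)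
          then some (((keys.toList.idxOf c : Nat) : Int) + 1) else o)
      else o)
      = if c ∈ keys.toList then some (pvFmin o (((keys.toList.idxOf c : Nat) : Int) + 1)) else o := by
  by_cases hm : c ∈ keys.toList
  · cases o with
    | none => simp [hm, pvFmin]
    | some w =>
      by_cases hlt : ((keys.toList.idxOf c : Nat) : Int) + 1 < w
      · simp [hm, hlt, pvFmin]
        omega
      · simp [hm, hlt, pvFmin]
        omega
  · simp [hm]

-- the effective keypads dict, read through get?, is exactly B's char_cost
theorem build_get? (keymap : List String) (d : PySem.Dict Char Int) (c : Char) :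
    (keymap.foldl (fun d k =>
        (PySem.List.enumerate k.toList 0).foldl (fun d p =>
          d.insert p.2 (if d.contains p.2 then min (p.1 + 1) (d.getD p.2 0) else p.1 + 1)) d) d).get? c
      = keymap.foldl (fun best keys =>
          if keys.toList.contains c then
            (if best.isNone || decide (((keys.toList.idxOf c : Nat) : Int) + 1 < best.getD 0)
              then some (((keys.toList.idxOf c : Nat) : Int) + 1) else best)
          else best) (d.get? c) := by
  induction keymap generalizing d with
  | nil => simp
  | cons k rest ih =>
    simp only [List.foldl_cons]
    rw [ih]
    congr 1
    rw [stepB_eq]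
    rw [inner_get? k.toList 0 d c]
    by_cases hm : c ∈ k.toList
    · simp only [hm, if_pos]
      congr 1
      congr 1
      omega
    · simp [hm]

theorem cost_eq (keymap : List String) (c : Char) :
    (keymap.foldl (fun d k =>
        (PySem.List.enumerate k.toList 0).foldl (fun d p =>
          d.insert p.2 (if d.contains p.2 then min (p.1 + 1) (d.getD p.2 0) else p.1 + 1)) d)
        PySem.Dict.empty).get? c = solutionAltCost keymap c := by
  rw [build_get?]
  simp [solutionAltCost, PySem.Dict.get?_empty]

theorem press_eq (keymap : List String) (keypads : PySem.Dict Char Int)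
    (h : ∀ c, keypads.get? c = solutionAltCost keymap c) :
    ∀ (l : List Char) (press : Int),
      solutionPress keypads l press = solutionAltPress keymap l press := by
  intro l
  induction l with
  | nil => intro press; rfl
  | cons ch rest ih =>
    intro press
    simp only [solutionPress, solutionAltPress]
    rw [PySem.Dict.contains_eq_isSome_get?, h ch]
    cases hg : solutionAltCost keymap ch with
    | none => simp
    | some v =>
      have : keypads.getD ch 0 = v := by
        rw [PySem.Dict.getD_eq_get?_getD, h ch, hg]; rfl
      simp [this, ih]

theorem foldl_append_map {α β : Type} (f : α → β) (l : List α) (acc : List β) :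
    l.foldl (fun a t => a ++ [f t]) acc = acc ++ l.map f := by
  induction l generalizing acc with
  | nil => simp
  | cons x xs ih => simp [ih]

-- ===== VERDICT (by name: the statement is the Claim_ definition above) =====
theorem solution_spec : Claim_equal_solution := by
  intro keymap targets _
  show solution keymap targets = solution_alt keymap targets
  simp only [solution, solution_alt]
  rw [foldl_append_map]
  simp only [List.nil_append]
  apply List.map_congr_left
  intro t _
  exact press_eq keymap _ (cost_eq keymap) t.toList 0
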